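-- pv_equiv track=rewrite | github.com/Um-king/Algorithm | 프로그래머스/2/131127. 할인 행사/할인 행사.py | solution
-- ===== SOURCE A (Python) =====
-- def solution(want, number, discount):
--     answer = 0
--
--     # 사려는 제품이 존재하는지 확인
--     for i, j in enumerate(want):
--         if number[i] != 0 and j not in discount:
--             return 0
--
--     for i in range(len(discount)):
--         a = []
--         lst = discount[i:i+10]
--
--         for j, k in enumerate(want):
--             if number[j] != lst.count(k):
--                 break
--             else:
--                 a.append(lst.count(k))
--         if a == number:
--             answer += 1
--
--     return answer
-- ===== SOURCE B (Python) =====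
-- def solution(want, number, discount):
--     # Sliding 10-day window: build the desired-count table once, keep running
--     # counts of the wanted items and update them incrementally as the window slides.
--     if len(want) != len(number):
--         return 0
--     need = {}
--     for w, n in zip(want, number):
--         if w in need:
--             if need[w] != n:
--                 return 0
--         else:
--             need[w] = n
--     cnt = {}
--     for k in need:
--         cnt[k] = 0
--     for item in discount[:10]:
--         if item in cnt:
--             cnt[item] += 1
--     answer = 0
--     nd = len(discount)
--     for s in range(nd):
--         if all(cnt[k] == v for k, v in need.items()):
--             answer += 1
--         item = discount[s]
--         if item in cnt:
--             cnt[item] -= 1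
--         if s + 10 < nd:
--             nxt = discount[s + 10]
--             if nxt in cnt:
--                 cnt[nxt] += 1
--     return answer
-- ===== Notes on version B (the rewrite author's own statement) =====
-- stated objective: alternative
-- what changed: B replaces A's per-window slice-and-recount (lst.count(k) for every wanted product in every of the N windows, plus a separate pre-scan pass) with a deduplicated need-table and a single sliding 10-day window whose per-product counts are updated incrementally (one add, one remove per shift); same asymptotic cost in practice, different traversal and data structure.
import Mathlib
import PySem

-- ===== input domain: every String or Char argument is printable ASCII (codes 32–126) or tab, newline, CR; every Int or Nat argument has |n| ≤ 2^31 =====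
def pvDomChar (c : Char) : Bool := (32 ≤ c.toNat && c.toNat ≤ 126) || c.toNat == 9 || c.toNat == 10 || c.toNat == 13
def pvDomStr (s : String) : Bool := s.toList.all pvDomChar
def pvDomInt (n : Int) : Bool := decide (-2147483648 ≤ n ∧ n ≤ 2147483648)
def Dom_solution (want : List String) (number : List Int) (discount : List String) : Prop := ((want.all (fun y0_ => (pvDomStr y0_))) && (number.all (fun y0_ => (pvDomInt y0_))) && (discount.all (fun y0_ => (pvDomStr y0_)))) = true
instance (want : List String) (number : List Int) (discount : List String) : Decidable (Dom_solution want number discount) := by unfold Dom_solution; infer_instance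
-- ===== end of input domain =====

-- B replaces A's per-window 10·|want| recount with a sliding 10-day window whose
-- per-item counts are updated incrementally against a deduplicated need-table.

-- ===== PORT A =====
-- inner 'for j, k in enumerate(want): …' loop of A's window scan (index-carrying recursion, early break returns a)
def innerA (number : List Int) (lst : List String) : List String → Nat → List Int → List Int
  | [], _, a => a
  | k :: rest, j, a =>
    if PySem.List.pyGetD number (j : Int) 0 ≠ (PySem.List.count lst k : Int) then a
    else innerA number lst rest (j + 1) (a ++ [(PySem.List.count lst k : Int)])

def solution (want : List String) (number : List Int) (discount : List String) : Int :=
  -- first loop: early 'return 0' when a wanted product with nonzero count is absent from discount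
  if (PySem.List.enumerate want 0).any
      (fun p => (PySem.List.pyGetD number p.1 0 != 0) && !(discount.contains p.2)) then 0
  else
    (PySem.List.pyRange 0 (discount.length : Int) 1).foldl (fun answer i =>
      let lst := PySem.List.slice discount (some i) (some (i + 10))
      let a := innerA number lst want 0 []
      if a == number then answer + 1 else answer) 0

-- ===== PORT B =====
-- 'need' table: first-occurrence desired count per product; none on an inconsistent duplicate
def buildNeed : List (String × Int) → PySem.Dict String Int → Option (PySem.Dict String Int)
  | [], d => some d
  | (w, n) :: rest, d =>
    if d.contains w then
      if d.getD w 0 ≠ n then none else buildNeed rest d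
    else buildNeed rest (d.insert w n)

-- one iteration of Source B's sliding-window loop: test, drop discount[s], add discount[s+10]
def slideStep (need : PySem.Dict String Int) (discount : List String) (nd : Int)
    (st : PySem.Dict String Int × Int) (s : Int) : PySem.Dict String Int × Int :=
  let answer := if need.items.all (fun p => st.1.getD p.1 0 == p.2) then st.2 + 1 else st.2
  let item := PySem.List.pyGetD discount s ""
  let cnt := if st.1.contains item then st.1.modify item 0 (· - 1) else st.1
  let cnt := if s + 10 < nd then
      let nxt := PySem.List.pyGetD discount (s + 10) ""
      if cnt.contains nxt then cnt.modify nxt 0 (· + 1) else cnt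
    else cnt
  (cnt, answer)

def solution_alt (want : List String) (number : List Int) (discount : List String) : Int :=
  if want.length ≠ number.length then 0
  else
    match buildNeed (want.zip number) PySem.Dict.empty with
    | none => 0
    | some need =>
      let cnt0 := need.keys.foldl (fun c k => c.insert k 0) PySem.Dict.empty
      let cnt1 := (PySem.List.slice discount none (some 10)).foldl
        (fun c item => if c.contains item then c.modify item 0 (· + 1) else c) cnt0
      ((PySem.List.pyRange 0 (discount.length : Int) 1).foldl
        (slideStep need discount (discount.length : Int)) (cnt1, 0)).2

-- ===== PRECONDITION & SPEC =====
-- Pre_ excludes exactly the inputs where A raises IndexError (number shorter than want and no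
-- earlier wanted-but-absent nonzero product triggers A's early 'return 0'); A returns on all of Pre_.
def Pre_solution (want : List String) (number : List Int) (discount : List String) : Prop :=
  want.length ≤ number.length ∨
    ∃ i < number.length, number.getD i 0 ≠ 0 ∧ ¬ (want.getD i "") ∈ discount
instance (want : List String) (number : List Int) (discount : List String) : Decidable (Pre_solution want number discount) := by unfold Pre_solution; infer_instance
def pvWitness_solution : List String × List Int × List String := (["a"], [1], ["a", "b"])

def Spec_solution (want : List String) (number : List Int) (discount : List String) (out : Int) : Prop := out = solution_alt want number discount
instance (want : List String) (number : List Int) (discount : List String) (out : Int) : Decidable (Spec_solution want number discount out) := by unfold Spec_solution; infer_instance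

-- ===== CLAIM (what is proved, stated in full; the proofs are below) =====
def Claim_equal_solution : Prop := ∀ (want : List String) (number : List Int) (discount : List String), Dom_solution want number discount → Pre_solution want number discount → Spec_solution want number discount (solution want number discount)

-- ===== LEMMAS AND PROOFS =====


-- window count of product k in the 10-day window starting at s
def wcnt (discount : List String) (s : Nat) (k : String) : Nat :=
  ((discount.drop s).take 10).count k

-- B's per-window test, phrased against the window counts
def matchB (need : PySem.Dict String Int) (discount : List String) (s : Nat) : Bool :=
  need.items.all (fun p => ((wcnt discount s p.1 : Int) == p.2))

lemma innerA_eq_iff (number : List Int) (lst : List String) :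
    ∀ (want : List String) (j : Nat) (acc : List Int),
    j + want.length ≤ number.length →
    acc ++ number.drop j = number →
    acc.length = j →
    (innerA number lst want j acc = number ↔
      (j + want.length = number.length ∧
       ∀ i, (hi : i < want.length) → number.getD (j + i) 0 = (PySem.List.count lst want[i] : Int))) := by
  intro want
  induction want with
  | nil =>
    intro j acc hle hacc hlen
    simp only [innerA, List.length_nil, Nat.add_zero] at *
    constructor
    · intro h
      subst h
      have hlq := congrArg List.length hacc
      simp at hlq
      refine ⟨by omega, fun i hi => absurd hi (by omega)⟩
    · rintro ⟨hj, -⟩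
      rw [← hacc, List.drop_eq_nil_iff.mpr (by omega)]
      simp
  | cons k rest ih =>
    intro j acc hle hacc hlen
    simp only [List.length_cons] at hle
    have hj : j < number.length := by omega
    have hgd : PySem.List.pyGetD number (j : Int) 0 = number.getD j 0 := PySem.List.pyGetD_natCast number j 0
    by_cases hcond : number.getD j 0 = (PySem.List.count lst k : Int)
    · have heq : innerA number lst (k :: rest) j acc
            = innerA number lst rest (j + 1) (acc ++ [(PySem.List.count lst k : Int)]) := by
        simp only [innerA]
        rw [hgd, if_neg (not_ne_iff.mpr hcond)]
      rw [heq]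
      have hdropj : List.drop j number = number[j] :: List.drop (j + 1) number := List.drop_eq_getElem_cons hj
      have hkj : (PySem.List.count lst k : Int) = number[j] := by
        rw [← hcond, List.getD_eq_getElem number 0 hj]
      have hacc' : (acc ++ [(PySem.List.count lst k : Int)]) ++ List.drop (j + 1) number = number := by
        rw [List.append_assoc, hkj, List.singleton_append, ← hdropj, hacc]
      rw [ih (j + 1) (acc ++ [(PySem.List.count lst k : Int)]) (by omega) hacc' (by simp [hlen])]
      constructor
      · rintro ⟨h1, h2⟩
        refine ⟨by simp only [List.length_cons] at *; omega, fun i hi => ?_⟩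
        cases i with
        | zero => simpa using hcond
        | succ i' =>
          have := h2 i' (by simpa using hi)
          simpa [Nat.add_comm, Nat.add_assoc, Nat.add_left_comm] using this
      · rintro ⟨h1, h2⟩
        refine ⟨by simp only [List.length_cons] at *; omega, fun i hi => ?_⟩
        have := h2 (i + 1) (by simpa using hi)
        simpa [Nat.add_comm, Nat.add_assoc, Nat.add_left_comm] using this
    · have heq : innerA number lst (k :: rest) j acc = acc := by
        simp only [innerA]
        rw [hgd, if_pos hcond]
      rw [heq]
      constructor
      · intro h
        exfalso
        have hl1 := congrArg List.length hacc
        have hl2 := congrArg List.length h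
        simp at hl1 hl2
        omega
      · rintro ⟨h1, h2⟩
        exfalso
        exact hcond (by simpa using h2 0 (by omega))

lemma bn_nodup : ∀ (l : List (String × Int)) (d nd : PySem.Dict String Int),
    buildNeed l d = some nd → d.keys.Nodup → nd.keys.Nodup := by
  intro l
  induction l with
  | nil => intro d nd h hd; cases h; exact hd
  | cons p t ih =>
    intro d nd h hd
    obtain ⟨w, n⟩ := p
    by_cases hc : d.contains w = true
    · by_cases hv : d.getD w 0 ≠ n
      · simp [buildNeed, hc, hv] at h
      · simp only [buildNeed, hc, if_true, hv, if_false] at h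
        exact ih d nd h hd
    · simp only [buildNeed, hc] at h
      exact ih _ nd h (PySem.Dict.nodup_keys_insert d w n hd)

lemma bn_preserve : ∀ (l : List (String × Int)) (d nd : PySem.Dict String Int),
    buildNeed l d = some nd → ∀ k, d.contains k = true → nd.get? k = d.get? k := by
  intro l
  induction l with
  | nil => intro d nd h k hk; cases h; rfl
  | cons p t ih =>
    intro d nd h k hk
    obtain ⟨w, n⟩ := p
    by_cases hc : d.contains w = true
    · by_cases hv : d.getD w 0 ≠ n
      · simp [buildNeed, hc, hv] at h
      · simp only [buildNeed, hc, if_true, hv, if_false] at h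
        exact ih d nd h k hk
    · simp only [buildNeed, hc] at h
      have hne : k ≠ w := fun he => by rw [he] at hk; exact absurd hk (by simp [hc])
      rw [ih _ nd h k (by rw [PySem.Dict.contains_insert]; simp [hk])]
      exact PySem.Dict.get?_insert_of_ne d n hne

lemma bn_lookup : ∀ (l : List (String × Int)) (d nd : PySem.Dict String Int),
    buildNeed l d = some nd → ∀ p ∈ l, nd.get? p.1 = some p.2 := by
  intro l
  induction l with
  | nil => intro d nd h p hp; cases hp
  | cons q t ih =>
    intro d nd h p hp
    obtain ⟨w, n⟩ := q
    by_cases hc : d.contains w = true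
    · by_cases hv : d.getD w 0 ≠ n
      · simp [buildNeed, hc, hv] at h
      · simp only [buildNeed, hc, if_true, hv, if_false] at h
        rcases List.mem_cons.mp hp with hh | ht
        · subst hh
          rw [not_not] at hv
          rw [bn_preserve t d nd h w hc]
          rcases (PySem.Dict.contains_eq_isSome_get? d w ▸ hc : (d.get? w).isSome = true) with h2
          obtain ⟨v, hv2⟩ := Option.isSome_iff_exists.mp h2
          rw [hv2]
          have := PySem.Dict.getD_eq_get?_getD d w 0
          rw [hv2] at this
          simp at this
          rw [← hv, this]
        · exact ih d nd h p ht
    · simp only [buildNeed, hc] at h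
      rcases List.mem_cons.mp hp with hh | ht
      · subst hh
        rw [bn_preserve t _ nd h w (by rw [PySem.Dict.contains_insert]; simp)]
        exact PySem.Dict.get?_insert_self d w n
      · exact ih _ nd h p ht

lemma bn_items : ∀ (l : List (String × Int)) (d nd : PySem.Dict String Int),
    buildNeed l d = some nd → ∀ p ∈ nd.items, p ∈ d.items ∨ p ∈ l := by
  intro l
  induction l with
  | nil => intro d nd h p hp; cases h; exact Or.inl hp
  | cons q t ih =>
    intro d nd h p hp
    obtain ⟨w, n⟩ := q
    by_cases hc : d.contains w = true
    · by_cases hv : d.getD w 0 ≠ n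
      · simp [buildNeed, hc, hv] at h
      · simp only [buildNeed, hc, if_true, hv, if_false] at h
        rcases ih d nd h p hp with h1 | h2
        · exact Or.inl h1
        · exact Or.inr (List.mem_cons_of_mem _ h2)
    · simp only [buildNeed, hc] at h
      rcases ih _ nd h p hp with h1 | h2
      · rw [PySem.Dict.items_insert_of_not_contains d n (Bool.not_eq_true _ ▸ hc)] at h1
        rcases List.mem_append.mp h1 with h3 | h4
        · exact Or.inl h3
        · simp at h4
          exact Or.inr (by simp [h4])
      · exact Or.inr (List.mem_cons_of_mem _ h2)

lemma bn_isSome : ∀ (l : List (String × Int)) (d : PySem.Dict String Int),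
    (∀ p ∈ l, ∀ v, d.get? p.1 = some v → v = p.2) →
    (∀ p ∈ l, ∀ q ∈ l, p.1 = q.1 → p.2 = q.2) →
    (buildNeed l d).isSome := by
  intro l
  induction l with
  | nil => intro d _ _; simp [buildNeed]
  | cons q t ih =>
    intro d h1 h2
    obtain ⟨w, n⟩ := q
    by_cases hc : d.contains w = true
    · have hg : d.getD w 0 = n := by
        obtain ⟨v, hv⟩ := Option.isSome_iff_exists.mp (PySem.Dict.contains_eq_isSome_get? d w ▸ hc)
        have := h1 (w, n) (by simp) v hv
        rw [PySem.Dict.getD_eq_get?_getD, hv, this]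
        rfl
      simp only [buildNeed, hc, if_true, hg, ne_eq, not_true_eq_false, if_false]
      exact ih d (fun p hp v hv => h1 p (List.mem_cons_of_mem _ hp) v hv)
        (fun p hp q hq he => h2 p (List.mem_cons_of_mem _ hp) q (List.mem_cons_of_mem _ hq) he)
    · simp only [buildNeed, hc]
      refine ih _ ?_ (fun p hp q hq he => h2 p (List.mem_cons_of_mem _ hp) q (List.mem_cons_of_mem _ hq) he)
      intro p hp v hv
      by_cases hw : p.1 = w
      · rw [hw, PySem.Dict.get?_insert_self] at hv
        cases hv
        have := h2 (w, n) (by simp) p (List.mem_cons_of_mem _ hp) hw.symm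
        simpa using this
      · rw [PySem.Dict.get?_insert_of_ne d n hw] at hv
        exact h1 p (List.mem_cons_of_mem _ hp) v hv

lemma keys_condModify (c : PySem.Dict String Int) (item : String) (f : Int → Int) :
    (if c.contains item then c.modify item 0 f else c).keys = c.keys := by
  by_cases h : c.contains item = true
  · simp only [h, if_true, PySem.Dict.keys_modify]
    exact PySem.Dict.keys_insert_of_contains c _ h
  · simp [h]

lemma getD_condModify (c : PySem.Dict String Int) (item k : String) (f : Int → Int) :
    (if c.contains item then c.modify item 0 f else c).getD k 0
      = if k = item ∧ k ∈ c.keys then f (c.getD k 0) else c.getD k 0 := by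
  by_cases h : c.contains item = true
  · simp only [h, if_true, PySem.Dict.getD_modify]
    by_cases hk : k = item
    · subst hk
      simp [(PySem.Dict.contains_iff_mem_keys c k).mp h]
    · simp [hk]
  · simp only [h]
    by_cases hk : k = item ∧ k ∈ c.keys
    · exact absurd ((PySem.Dict.contains_iff_mem_keys c item).mpr (hk.1 ▸ hk.2)) h
    · simp [hk]

lemma keys_countFold : ∀ (l : List String) (c : PySem.Dict String Int),
    (l.foldl (fun c item => if c.contains item then c.modify item 0 (· + 1) else c) c).keys = c.keys := by
  intro l
  induction l with
  | nil => intro c; rfl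
  | cons item t ih =>
    intro c
    simp only [List.foldl_cons]
    rw [ih]
    exact keys_condModify c item _

lemma getD_countFold : ∀ (l : List String) (c : PySem.Dict String Int) (k : String),
    (l.foldl (fun c item => if c.contains item then c.modify item 0 (· + 1) else c) c).getD k 0
      = c.getD k 0 + (if k ∈ c.keys then (l.count k : Int) else 0) := by
  intro l
  induction l with
  | nil => intro c k; simp
  | cons item t ih =>
    intro c k
    simp only [List.foldl_cons]
    rw [ih, getD_condModify, keys_condModify]
    have hc : (item :: t).count k = t.count k + if item == k then 1 else 0 := List.count_cons
    by_cases hk : k ∈ c.keys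
    · by_cases he : k = item
      · subst he
        simp only [hk, and_true, hc]
        push_cast
        simp
        ring
      · have : (item == k) = false := by simp; exact fun h => he h.symm
        simp [hk, he, hc, this]
    · simp [hk]

lemma cnt0_spec : ∀ (ks : List String), ks.Nodup → ∀ (c : PySem.Dict String Int),
    (∀ k ∈ ks, c.contains k = false) →
    ((ks.foldl (fun c k => c.insert k 0) c).keys = c.keys ++ ks ∧
     ∀ k, (ks.foldl (fun c k => c.insert k 0) c).getD k 0 = if k ∈ ks then 0 else c.getD k 0) := by
  intro ks
  induction ks with
  | nil => intro _ c _; simp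
  | cons k t ih =>
    intro hnd c hfresh
    have hkc : c.contains k = false := hfresh k (by simp)
    have hfresh' : ∀ k' ∈ t, (c.insert k 0).contains k' = false := by
      intro k' hk'
      rw [PySem.Dict.contains_insert]
      have hne : k' ≠ k := fun h => (List.nodup_cons.mp hnd).1 (h ▸ hk')
      simp [hne, hfresh k' (by simp [hk'])]
    obtain ⟨ihk, ihg⟩ := ih (List.nodup_cons.mp hnd).2 (c.insert k 0) hfresh'
    constructor
    · simp only [List.foldl_cons, ihk, PySem.Dict.keys_insert_of_not_contains c 0 hkc]
      simp
    · intro k'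
      simp only [List.foldl_cons, ihg k']
      by_cases h1 : k' ∈ t
      · simp [h1]
      · by_cases h2 : k' = k
        · subst h2; simp [h1, PySem.Dict.getD_insert_self]
        · simp [h1, h2, PySem.Dict.getD_insert_of_ne c 0 0 h2]

lemma wcnt_succ (discount : List String) (s : Nat) (k : String) (hs : s < discount.length) :
    (wcnt discount (s + 1) k : Int) = (wcnt discount s k : Int)
      - (if discount.getD s "" = k then 1 else 0)
      + (if s + 10 < discount.length ∧ discount.getD (s + 10) "" = k then 1 else 0) := by
  unfold wcnt
  have hdrop : List.drop s discount = discount[s] :: List.drop (s + 1) discount :=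
    List.drop_eq_getElem_cons hs
  rw [hdrop, show (10 : Nat) = 9 + 1 from rfl, List.take_succ_cons, List.take_add_one,
    List.count_cons, List.count_append, List.getElem?_drop]
  rw [List.getD_eq_getElem discount "" hs]
  rw [show s + 1 + 9 = s + 10 from by omega]
  by_cases hc : s + 10 < discount.length
  · rw [List.getElem?_eq_getElem hc]
    have hg10 : discount.getD (s + 10) "" = discount[s + 10] := List.getD_eq_getElem discount "" hc
    rw [hg10]
    simp only [Option.toList_some, hc, true_and]
    by_cases h1 : discount[s] = k <;> by_cases h2 : discount[s + 10] = k <;>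
      simp [h1, h2, beq_iff_eq]
  · rw [List.getElem?_eq_none (by omega : discount.length ≤ s + 10)]
    simp only [Option.toList_none, List.count_nil, hc, false_and, if_false]
    by_cases h1 : discount[s] = k <;> simp [h1, beq_iff_eq]

lemma slideFold (need : PySem.Dict String Int) (discount : List String) :
    ∀ (m s : Nat) (cnt : PySem.Dict String Int) (ans : Int),
    s + m = discount.length →
    cnt.keys = need.keys →
    (∀ k ∈ need.keys, cnt.getD k 0 = (wcnt discount s k : Int)) →
    ((PySem.List.pyRange (s : Int) (discount.length : Int) 1).foldl
        (slideStep need discount (discount.length : Int)) (cnt, ans)).2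
      = ans + ((List.range' s m).countP (fun i => matchB need discount i) : Int) := by
  intro m
  induction m with
  | zero =>
    intro s cnt ans hsum hkeys hinv
    have hle : (discount.length : Int) ≤ (s : Int) := by exact_mod_cast (by omega : discount.length ≤ s)
    rw [PySem.List.pyRange_one_eq_nil hle]
    simp
  | succ m ihm =>
    intro s cnt ans hsum hkeys hinv
    have hs : s < discount.length := by omega
    have hcast : (s : Int) < (discount.length : Int) := by exact_mod_cast hs
    rw [PySem.List.pyRange_one_cons hcast, List.foldl_cons]
    -- the window test of this iteration agrees with matchB s
    have tst : (need.items.all (fun p => cnt.getD p.1 0 == p.2)) = matchB need discount s := by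
      unfold matchB
      rw [Bool.eq_iff_iff, List.all_eq_true, List.all_eq_true]
      constructor <;> intro h p hp <;> have hk := hinv p.1 (PySem.Dict.mem_keys_of_mem_items need hp)
      · rw [beq_iff_eq, ← hk]
        exact beq_iff_eq.mp (h p hp)
      · rw [beq_iff_eq, hk]
        exact beq_iff_eq.mp (h p hp)
    have hitem : PySem.List.pyGetD discount (s : Int) "" = discount.getD s "" :=
      PySem.List.pyGetD_natCast discount s ""
    have hnxt : PySem.List.pyGetD discount ((s : Int) + 10) "" = discount.getD (s + 10) "" := by
      rw [show ((s : Int) + 10) = ((s + 10 : Nat) : Int) by push_cast; ring]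
      exact PySem.List.pyGetD_natCast discount (s + 10) ""
    have hguard : ((s : Int) + 10 < (discount.length : Int)) ↔ (s + 10 < discount.length) := by
      constructor <;> intro h <;> exact_mod_cast h
    -- the updated counter dictionary
    set cnt1 := (if cnt.contains (discount.getD s "") then cnt.modify (discount.getD s "") 0 (· - 1) else cnt) with hc1
    set cnt2 := (if s + 10 < discount.length then
        (if cnt1.contains (discount.getD (s + 10) "") then cnt1.modify (discount.getD (s + 10) "") 0 (· + 1) else cnt1)
      else cnt1) with hc2
    have hstep : slideStep need discount (discount.length : Int) (cnt, ans) (s : Int)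
        = (cnt2, if matchB need discount s then ans + 1 else ans) := by
      simp only [slideStep, hitem, hnxt, tst]
      rw [← hc1]
      by_cases hg : s + 10 < discount.length
      · rw [if_pos (hguard.mpr hg), hc2, if_pos hg]
      · rw [if_neg (fun h => hg (hguard.mp h)), hc2, if_neg hg]
    rw [hstep]
    have hkeys1 : cnt1.keys = need.keys := by rw [hc1, keys_condModify, hkeys]
    have hkeys2 : cnt2.keys = need.keys := by
      rw [hc2]
      by_cases hg : s + 10 < discount.length
      · rw [if_pos hg, keys_condModify, hkeys1]
      · rw [if_neg hg, hkeys1]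
    have hinv2 : ∀ k ∈ need.keys, cnt2.getD k 0 = (wcnt discount (s + 1) k : Int) := by
      intro k hkmem
      have hv1 : cnt1.getD k 0 = cnt.getD k 0 - (if discount.getD s "" = k then 1 else 0) := by
        rw [hc1, getD_condModify, hkeys]
        by_cases h1 : k = discount.getD s ""
        · rw [if_pos ⟨h1, hkmem⟩, if_pos h1.symm]
        · rw [if_neg (fun hh => h1 hh.1), if_neg (fun hh : discount.getD s "" = k => h1 hh.symm), sub_zero]
      have hv2 : cnt2.getD k 0 = cnt1.getD k 0
          + (if s + 10 < discount.length ∧ discount.getD (s + 10) "" = k then 1 else 0) := by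
        rw [hc2]
        by_cases hg : s + 10 < discount.length
        · rw [if_pos hg, getD_condModify, hkeys1]
          by_cases h2 : k = discount.getD (s + 10) ""
          · rw [if_pos ⟨h2, hkmem⟩, if_pos ⟨hg, h2.symm⟩]
          · rw [if_neg (fun hh => h2 hh.1), if_neg (fun hh => h2 hh.2.symm), add_zero]
        · rw [if_neg hg, if_neg (fun hh => hg hh.1), add_zero]
      rw [hv2, hv1, hinv k hkmem, ← wcnt_succ discount s k hs]
    have hrange : ((s : Int) + 1) = ((s + 1 : Nat) : Int) := by push_cast; ring
    rw [hrange, ihm (s + 1) cnt2 _ (by omega) hkeys2 hinv2]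
    rw [List.range'_succ, List.countP_cons]
    by_cases hm : matchB need discount s = true
    · simp only [hm, if_true]
      push_cast
      ring
    · simp only [hm]
      rw [if_neg (by simp)]
      push_cast
      ring

lemma mem_zip_iff (want : List String) (number : List Int) (p : String × Int)
    (hlen : want.length = number.length) :
    p ∈ want.zip number ↔ ∃ i, ∃ hi : i < want.length, p = (want[i], number.getD i 0) := by
  constructor
  · intro hp
    obtain ⟨i, hi, he⟩ := List.mem_iff_getElem.mp hp
    have hiw : i < want.length := by
      have := hi
      simp [List.length_zip] at this
      omega
    refine ⟨i, hiw, ?_⟩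
    rw [← he, List.getElem_zip, List.getD_eq_getElem number 0 (by omega)]
  · rintro ⟨i, hi, he⟩
    have hiz : i < (want.zip number).length := by simp [List.length_zip]; omega
    subst he
    have h2 : (want[i], number.getD i 0) = (want.zip number)[i]'hiz := by
      rw [List.getElem_zip, List.getD_eq_getElem number 0 (by omega)]
    rw [h2]
    exact List.getElem_mem hiz


lemma matchB_iff (want : List String) (number : List Int) (discount : List String)
    (need : PySem.Dict String Int)
    (hb : buildNeed (want.zip number) PySem.Dict.empty = some need)
    (hlen : want.length = number.length) (s : Nat) :
    matchB need discount s = true ↔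
      ∀ i, (hi : i < want.length) → number.getD i 0 = (wcnt discount s want[i] : Int) := by
  have hnd : need.keys.Nodup := bn_nodup _ _ _ hb PySem.Dict.nodup_keys_empty
  unfold matchB
  rw [List.all_eq_true]
  constructor
  · intro h i hi
    have hmem : (want[i], number.getD i 0) ∈ want.zip number :=
      (mem_zip_iff want number (want[i], number.getD i 0) hlen).mpr ⟨i, hi, rfl⟩
    have hlk := bn_lookup _ _ _ hb _ hmem
    have hit : (want[i], number.getD i 0) ∈ need.items :=
      (PySem.Dict.get?_eq_some_iff_mem_items need want[i] (number.getD i 0) hnd).mp hlk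
    have h3 := h _ hit
    exact (beq_iff_eq.mp h3).symm
  · intro h p hp
    rcases bn_items _ _ _ hb p hp with h1 | h2
    · have hempty : PySem.Dict.empty.items = ([] : List (String × Int)) := rfl
      rw [hempty] at h1
      cases h1
    · obtain ⟨i, hi, he⟩ := (mem_zip_iff want number p hlen).mp h2
      subst he
      simpa [beq_iff_eq] using (h i hi).symm

-- A's window predicate: the inner loop reproduced list equals number
def pA (want : List String) (number : List Int) (discount : List String) (i : Nat) : Bool :=
  innerA number ((discount.drop i).take 10) want 0 [] == number

lemma solutionA_eq (want : List String) (number : List Int) (discount : List String)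
    (hg : ((PySem.List.enumerate want 0).any
      (fun p => (PySem.List.pyGetD number p.1 0 != 0) && !(discount.contains p.2))) = false) :
    solution want number discount
      = ((List.range discount.length).countP (pA want number discount) : Int) := by
  unfold solution
  rw [hg]
  simp only [Bool.false_eq_true, if_false]
  rw [show (fun (answer : Int) (i : Int) =>
        let lst := PySem.List.slice discount (some i) (some (i + 10))
        let a := innerA number lst want 0 []
        if a == number then answer + 1 else answer)
      = (fun (answer : Int) (i : Int) =>
        if (innerA number (PySem.List.slice discount (some i) (some (i + 10))) want 0 [] == number) = true
        then answer + 1 else answer) from rfl]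
  rw [PySem.List.foldl_count_if
    (fun i => innerA number (PySem.List.slice discount (some i) (some (i + 10))) want 0 [] == number)
    (PySem.List.pyRange 0 (discount.length : Int)) 0]
  rw [zero_add, PySem.List.pyRange_one 0 (discount.length : Int)]
  rw [show ((discount.length : Int) - 0).toNat = discount.length by omega]
  rw [List.countP_map]
  congr 1
  apply List.countP_congr
  intro k hk
  have hk' : k < discount.length := List.mem_range.mp hk
  simp only [Function.comp]
  rw [show ((0 : Int) + (k : Int)) = (k : Int) from zero_add _]
  rw [show ((k : Int) + 10) = ((k : Int) + ((10 : Nat) : Int)) by norm_num]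
  rw [PySem.List.slice_natCast_add]
  exact Iff.rfl

lemma solutionB_eq (want : List String) (number : List Int) (discount : List String)
    (need : PySem.Dict String Int)
    (hlen : want.length = number.length)
    (hb : buildNeed (want.zip number) PySem.Dict.empty = some need) :
    solution_alt want number discount
      = ((List.range discount.length).countP (fun i => matchB need discount i) : Int) := by
  have hnd : need.keys.Nodup := bn_nodup _ _ _ hb PySem.Dict.nodup_keys_empty
  unfold solution_alt
  rw [if_neg (not_ne_iff.mpr hlen), hb]
  simp only
  have hfresh : ∀ k ∈ need.keys, (PySem.Dict.empty : PySem.Dict String Int).contains k = false :=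
    fun k _ => PySem.Dict.contains_empty k
  obtain ⟨hk0, hg0⟩ := cnt0_spec need.keys hnd PySem.Dict.empty hfresh
  have hk0' : (need.keys.foldl (fun c k => c.insert k 0) (PySem.Dict.empty : PySem.Dict String Int)).keys = need.keys :=
    hk0.trans (by rw [PySem.Dict.keys_empty, List.nil_append])
  have hslice : PySem.List.slice discount none (some 10) = discount.take 10 := by
    rw [PySem.List.slice_to discount (by norm_num : (0 : Int) ≤ 10)]
    rfl
  rw [hslice]
  have hkeys1 : ((discount.take 10).foldl
      (fun c item => if c.contains item then c.modify item 0 (· + 1) else c)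
      (need.keys.foldl (fun c k => c.insert k 0) (PySem.Dict.empty : PySem.Dict String Int))).keys = need.keys :=
    (keys_countFold (discount.take 10) _).trans hk0'
  have hinv1 : ∀ k ∈ need.keys,
      ((discount.take 10).foldl
        (fun c item => if c.contains item then c.modify item 0 (· + 1) else c)
        (need.keys.foldl (fun c k => c.insert k 0) (PySem.Dict.empty : PySem.Dict String Int))).getD k 0
      = (wcnt discount 0 k : Int) := by
    intro k hkm
    rw [getD_countFold (discount.take 10) _ k, hg0 k, if_pos hkm, hk0', if_pos hkm, zero_add]
    unfold wcnt
    rw [List.drop_zero]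
  have := slideFold need discount discount.length 0 _ 0 (by omega) hkeys1 hinv1
  rw [show ((0 : Nat) : Int) = (0 : Int) from rfl] at this
  rw [this, zero_add, ← List.range_eq_range']

-- the early-return test of A, as a named condition
lemma guard_true_of (want : List String) (number : List Int) (discount : List String)
    (i : Nat) (hi : i < want.length)
    (hnz : number.getD i 0 ≠ 0) (hmem : want[i] ∉ discount) :
    ((PySem.List.enumerate want 0).any
      (fun p => (PySem.List.pyGetD number p.1 0 != 0) && !(discount.contains p.2))) = true := by
  rw [List.any_eq_true]
  refine ⟨((i : Int), want[i]), ?_, ?_⟩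
  · exact (PySem.List.mem_enumerate_iff want 0 _).mpr ⟨i, hi, by rw [zero_add]⟩
  · rw [Bool.and_eq_true]
    constructor
    · rw [bne_iff_ne, PySem.List.pyGetD_natCast]
      exact hnz
    · rw [Bool.not_eq_true', ← Bool.not_eq_true]
      intro hcon
      exact hmem (List.contains_iff_mem.mp hcon)

-- a wanted product absent from the whole discount list has window count 0
lemma wcnt_eq_zero (discount : List String) (s : Nat) (k : String) (hk : k ∉ discount) :
    wcnt discount s k = 0 := by
  unfold wcnt
  have hsub : (((discount.drop s).take 10)).Sublist discount :=
    (List.take_sublist 10 (discount.drop s)).trans (List.drop_sublist s discount)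
  have := List.Sublist.count_le k hsub
  have hz : discount.count k = 0 := List.count_eq_zero.mpr hk
  omega

-- A's window predicate at i, unfolded through the inner loop (lengths equal)
lemma pA_iff (want : List String) (number : List Int) (discount : List String)
    (hle : want.length ≤ number.length) (i : Nat) :
    pA want number discount i = true ↔
      (want.length = number.length ∧
       ∀ j, (hj : j < want.length) → number.getD j 0 = (wcnt discount i want[j] : Int)) := by
  unfold pA
  rw [beq_iff_eq]
  rw [innerA_eq_iff number ((discount.drop i).take 10) want 0 []
    (by omega) (by rw [List.nil_append, List.drop_zero]) rfl]
  constructor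
  · rintro ⟨h1, h2⟩
    refine ⟨by omega, fun j hj => ?_⟩
    have := h2 j hj
    rw [zero_add] at this
    rw [this]
    rfl
  · rintro ⟨h1, h2⟩
    refine ⟨by omega, fun j hj => ?_⟩
    rw [zero_add, h2 j hj]
    rfl

-- ===== VERDICT (by name: the statement is the Claim_ definition above) =====
theorem solution_spec : Claim_equal_solution := by
  intro want number discount _ hpre
  unfold Spec_solution
  by_cases hlen : want.length = number.length
  · -- equal lengths: the main case
    cases hbn : buildNeed (want.zip number) PySem.Dict.empty with
    | none =>
      -- inconsistent duplicate wants: no window can match on either side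
      have hB : solution_alt want number discount = 0 := by
        unfold solution_alt
        rw [if_neg (not_ne_iff.mpr hlen), hbn]
      rw [hB]
      by_cases hgu : ((PySem.List.enumerate want 0).any
          (fun p => (PySem.List.pyGetD number p.1 0 != 0) && !(discount.contains p.2))) = true
      · unfold solution
        rw [if_pos hgu]
      · rw [solutionA_eq want number discount (Bool.not_eq_true _ ▸ hgu)]
        have hzero : ∀ i ∈ List.range discount.length, ¬ pA want number discount i = true := by
          intro i _ hpa
          obtain ⟨-, h2⟩ := (pA_iff want number discount (le_of_eq hlen) i).mp hpa
          have hcons : ∀ p ∈ want.zip number, ∀ q ∈ want.zip number, p.1 = q.1 → p.2 = q.2 := by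
            intro p hp q hq he
            obtain ⟨a, ha, hpe⟩ := (mem_zip_iff want number p hlen).mp hp
            obtain ⟨b, hb2, hqe⟩ := (mem_zip_iff want number q hlen).mp hq
            subst hpe; subst hqe
            simp only at he ⊢
            rw [h2 a ha, h2 b hb2, he]
          have hsome := bn_isSome (want.zip number) PySem.Dict.empty
            (fun p _ v hv => by rw [PySem.Dict.get?_empty] at hv; cases hv) hcons
          rw [hbn] at hsome
          cases hsome
        rw [List.countP_eq_zero.mpr hzero]
        rfl
    | some need =>
      rw [solutionB_eq want number discount need hlen hbn]
      by_cases hgu : ((PySem.List.enumerate want 0).any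
          (fun p => (PySem.List.pyGetD number p.1 0 != 0) && !(discount.contains p.2))) = true
      · -- A returns 0 early; but then no window matches, so B counts 0 as well
        unfold solution
        rw [if_pos hgu]
        obtain ⟨p, hp, hcond⟩ := List.any_eq_true.mp hgu
        obtain ⟨idx, hidx, hpe⟩ := (PySem.List.mem_enumerate_iff want 0 p).mp hp
        subst hpe
        rw [Bool.and_eq_true] at hcond
        have hnz : number.getD idx 0 ≠ 0 := by
          have := hcond.1
          rw [zero_add, bne_iff_ne, PySem.List.pyGetD_natCast] at this
          exact this
        have hnm : want[idx] ∉ discount := by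
          have := hcond.2
          simp only at this
          rw [Bool.not_eq_true', ← Bool.not_eq_true] at this
          exact fun hmem => this (List.contains_iff_mem.mpr hmem)
        have hzero : ∀ i ∈ List.range discount.length, ¬ matchB need discount i = true := by
          intro i _ hmb
          have h2 := (matchB_iff want number discount need hbn hlen i).mp hmb idx hidx
          rw [wcnt_eq_zero discount i want[idx] hnm] at h2
          exact hnz (by simpa using h2)
        rw [List.countP_eq_zero.mpr hzero]
        rfl
      · rw [solutionA_eq want number discount (Bool.not_eq_true _ ▸ hgu)]
        congr 1
        apply List.countP_congr
        intro i _
        rw [pA_iff want number discount (le_of_eq hlen) i,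
          matchB_iff want number discount need hbn hlen i]
        constructor
        · rintro ⟨-, h⟩; exact h
        · intro h; exact ⟨hlen, h⟩
  · -- unequal lengths: both sides return 0
    have hB : solution_alt want number discount = 0 := by
      unfold solution_alt
      rw [if_pos hlen]
    rw [hB]
    by_cases hgu : ((PySem.List.enumerate want 0).any
        (fun p => (PySem.List.pyGetD number p.1 0 != 0) && !(discount.contains p.2))) = true
    · unfold solution
      rw [if_pos hgu]
    · by_cases hwl : want.length ≤ number.length
      · rw [solutionA_eq want number discount (Bool.not_eq_true _ ▸ hgu)]
        have hzero : ∀ i ∈ List.range discount.length, ¬ pA want number discount i = true := by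
          intro i _ hpa
          exact hlen ((pA_iff want number discount hwl i).mp hpa).1
        rw [List.countP_eq_zero.mpr hzero]
        rfl
      · -- Pre_ forces A's early return here, contradicting hgu
        rcases hpre with h1 | ⟨i, hi, hnz, hnm⟩
        · exact absurd h1 hwl
        · have hiw : i < want.length := by omega
          have hget : want.getD i "" = want[i] := List.getD_eq_getElem want "" hiw
          rw [hget] at hnm
          exact absurd (guard_true_of want number discount i hiw hnz hnm) hgu
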